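-- pv_equiv track=rewrite | github.com/ValNyz/ldvelh | backend/api/streaming.py | extract_narrative_from_partial
-- ===== SOURCE A (Python) =====
-- def extract_narrative_from_partial(partial_json: str) -> str | None:
--     """
--     Extrait le texte narratif d'un JSON partiel en cours de streaming.
--     Gère les cas où le JSON n'est pas encore complet.
--     """
--     # Cherche "narrative_text": "
--     marker = '"narrative_text":'
--     start = partial_json.find(marker)
--
--     if start == -1:
--         # Essayer avec narratif (ancien format)
--         marker = '"narratif":'
--         start = partial_json.find(marker)
--
--     if start == -1:
--         return None
--
--     # Trouve le début de la string
--     quote_start = partial_json.find('"', start + len(marker))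
--     if quote_start == -1:
--         return None
--
--     # Extrait jusqu'à la fin ou jusqu'au prochain guillemet non-échappé
--     content = []
--     i = quote_start + 1
--     while i < len(partial_json):
--         char = partial_json[i]
--
--         if char == "\\" and i + 1 < len(partial_json):
--             # Caractère échappé
--             next_char = partial_json[i + 1]
--             if next_char == "n":
--                 content.append("\n")
--             elif next_char == '"':
--                 content.append('"')
--             elif next_char == "\\":
--                 content.append("\\")
--             else:
--                 content.append(next_char)
--             i += 2
--         elif char == '"':
--             # Fin de la string
--             break
--         else:
--             content.append(char)
--             i += 1
--
--     result = "".join(content).strip()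
--     return result if result else None
-- ===== SOURCE B (Python) =====
-- import re
--
--
-- def extract_narrative_from_partial(partial_json):
--     marker = '"narrative_text":'
--     start = partial_json.find(marker)
--     if start == -1:
--         marker = '"narratif":'
--         start = partial_json.find(marker)
--     if start == -1:
--         return None
--     quote_start = partial_json.find('"', start + len(marker))
--     if quote_start == -1:
--         return None
--     # Split the tail at double-quote characters; a separator preceded by an odd run
--     # of backslashes was escaped, so glue those pieces back; the first even-run
--     # quote ends the string.
--     parts = partial_json[quote_start + 1:].split('"')
--     raw = parts[0]
--     for part in parts[1:]:
--         if (len(raw) - len(raw.rstrip('\\'))) % 2 == 0: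
--             break
--         raw += '"' + part
--     # Decode escapes in one regex pass: \n -> newline, \x -> x otherwise;
--     # a trailing lone backslash is left untouched.
--     decoded = re.sub(r'\\(.)', lambda m: '\n' if m.group(1) == 'n' else m.group(1),
--                      raw, flags=re.S)
--     result = decoded.strip()
--     return result if result else None
-- ===== Notes on version B (the rewrite author's own statement) =====
-- stated objective: alternative
-- what changed: A decodes with one fused index loop that simultaneously finds the closing quote and unescapes; B first locates the raw string by splitting the tail at double quotes and re-gluing pieces whose accumulated text ends in an odd backslash run, then decodes escapes in a separate regex pass.
import Mathlib
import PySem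

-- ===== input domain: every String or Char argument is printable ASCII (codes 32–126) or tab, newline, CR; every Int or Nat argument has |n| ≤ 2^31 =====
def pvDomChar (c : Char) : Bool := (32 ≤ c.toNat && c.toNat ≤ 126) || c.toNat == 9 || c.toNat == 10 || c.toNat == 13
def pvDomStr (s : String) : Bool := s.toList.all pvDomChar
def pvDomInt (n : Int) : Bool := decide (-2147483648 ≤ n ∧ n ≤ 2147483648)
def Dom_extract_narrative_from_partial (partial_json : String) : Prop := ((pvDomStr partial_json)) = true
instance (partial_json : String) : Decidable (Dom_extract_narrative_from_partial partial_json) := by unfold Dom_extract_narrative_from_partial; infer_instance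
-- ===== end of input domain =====

-- B replaces A's fused find-the-end-and-unescape index loop by split-at-quotes /
-- reglue-odd-backslash-runs to locate the raw string, then a separate escape-decoding
-- pass (objective: alternative decomposition; same cost).

-- ===== PORT A =====
-- A's while loop over i, consuming a backslash plus the next char as a pair,
-- stopping at an unescaped double quote, transliterated as the obvious structural recursion on the
-- remaining characters (same branch order; a lone final '\' falls to the else branch).
def pvDecodeA : List Char → List Char
  | [] => []
  | '\\' :: next :: rest =>
      (if next = 'n' then '\n' else if next = '"' then '"'
       else if next = '\\' then '\\' else next) :: pvDecodeA rest
  | '"' :: _ => []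
  | c :: rest => c :: pvDecodeA rest

def extract_narrative_from_partial (partial_json : String) : Option String :=
  let marker := "\"narrative_text\":"
  let start := PySem.Str.find partial_json marker
  let p : String × Int :=
    if start = -1 then ("\"narratif\":", PySem.Str.find partial_json "\"narratif\":")
    else (marker, start)
  if p.2 = -1 then none
  else
    let quote_start := PySem.Str.findFrom partial_json "\"" (p.2 + PySem.Str.len p.1)
    if quote_start = -1 then none
    else
      let content := pvDecodeA (PySem.List.slice partial_json.toList (some (quote_start + 1)) none)
      let result := PySem.Chars.strip content
      if result = [] then none else some (String.ofList result)

-- ===== PORT B =====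
-- port of len(raw) - len(raw.rstrip('\\')): rstrip with a char set, by hand (exact)
def pvTrailBS (raw : List Char) : Nat :=
  raw.length - ((raw.reverse.dropWhile (· = '\\')).reverse).length

-- Source B's for loop re-gluing split pieces while the accumulated raw text ends in
-- an odd backslash run (break on even)
def pvReglue (raw : List Char) : List (List Char) → List Char
  | [] => raw
  | p :: ps => if pvTrailBS raw % 2 = 0 then raw else pvReglue (raw ++ '"' :: p) ps

-- port of re.sub(r'\\(.)', λm. '\n' if m.group(1)=='n' else m.group(1), raw, re.S):
-- leftmost scan replacing each backslash+char pair, by hand (exact; a trailing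
-- lone backslash is not matched and kept)
def pvDecodeB : List Char → List Char
  | '\\' :: c :: rest => (if c = 'n' then '\n' else c) :: pvDecodeB rest
  | c :: rest => c :: pvDecodeB rest
  | [] => []

def extract_narrative_from_partial_alt (partial_json : String) : Option String :=
  let marker := "\"narrative_text\":"
  let start := PySem.Str.find partial_json marker
  let p : String × Int :=
    if start = -1 then ("\"narratif\":", PySem.Str.find partial_json "\"narratif\":")
    else (marker, start)
  if p.2 = -1 then none
  else
    let quote_start := PySem.Str.findFrom partial_json "\"" (p.2 + PySem.Str.len p.1)
    if quote_start = -1 then none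
    else
      let tail := PySem.List.slice partial_json.toList (some (quote_start + 1)) none
      let raw :=
        match PySem.Chars.splitOn tail ['"'] with  -- tail.split at the double-quote char; parts is never []
        | [] => []
        | p0 :: ps => pvReglue p0 ps
      let result := PySem.Chars.strip (pvDecodeB raw)
      if result = [] then none else some (String.ofList result)

-- ===== PRECONDITION & SPEC =====
def Spec_extract_narrative_from_partial (partial_json : String) (out : Option String) : Prop := out = extract_narrative_from_partial_alt partial_json
instance (partial_json : String) (out : Option String) : Decidable (Spec_extract_narrative_from_partial partial_json out) := by unfold Spec_extract_narrative_from_partial; infer_instance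

-- ===== CLAIM (what is proved, stated in full; the proofs are below) =====
def Claim_equal_extract_narrative_from_partial : Prop := ∀ (partial_json : String), Dom_extract_narrative_from_partial partial_json → Spec_extract_narrative_from_partial partial_json (extract_narrative_from_partial partial_json)

-- ===== LEMMAS AND PROOFS =====

-- simple recursive characterization of splitOn on the single-char separator '"'
def pvSplit : List Char → List (List Char)
  | [] => [[]]
  | '"' :: rest => [] :: pvSplit rest
  | c :: rest => (pvSplit rest).modifyHead (c :: ·)

theorem pvSplit_ne_nil (l : List Char) : pvSplit l ≠ [] := by
  induction l with
  | nil => simp [pvSplit]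
  | cons c rest ih =>
      rw [pvSplit.eq_def]
      split
      · simp
      · simp
      · rename_i hne heq
        injection heq with _ h2
        subst h2
        cases h : pvSplit rest with
        | nil => exact absurd h ih
        | cons p ps => simp [h]

theorem pvSplitOn_go_eq (fuel : Nat) (l cur : List Char) (acc : List (List Char))
    (h : l.length ≤ fuel) :
    PySem.Chars.splitOn.go ['"'] fuel l cur acc
      = acc.reverse ++ (pvSplit l).modifyHead (cur.reverse ++ ·) := by
  induction fuel generalizing l cur acc with
  | zero =>
      have hl : l = [] := List.length_eq_zero_iff.mp (Nat.le_zero.mp h)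
      subst hl
      simp [PySem.Chars.splitOn.go, pvSplit]
  | succ n ih =>
      cases l with
      | nil => simp [PySem.Chars.splitOn.go, pvSplit]
      | cons c rest =>
          rw [PySem.Chars.splitOn.go]
          by_cases hc : c = '"'
          · subst hc
            have hpre : List.isPrefixOf ['"'] ('"' :: rest) = true := by
              simp [List.isPrefixOf]
            simp only [hpre, if_pos, List.length_cons, List.length_nil,
              List.drop_succ_cons, List.drop_zero]
            rw [ih rest [] _ (by simpa using Nat.le_of_succ_le_succ h)]
            cases hs : pvSplit rest with
            | nil => exact absurd hs (pvSplit_ne_nil rest)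
            | cons p ps => simp [pvSplit, hs, List.modifyHead]
          · have hpre : List.isPrefixOf ['"'] (c :: rest) = false := by
              simp [List.isPrefixOf]
              intro hq; exact hc hq.symm
            simp only [hpre, Bool.false_eq_true, if_false]
            rw [ih rest (c :: cur) acc (by simpa using Nat.le_of_succ_le_succ h)]
            have hsp : pvSplit (c :: rest) = (pvSplit rest).modifyHead (c :: ·) := by
              rw [pvSplit.eq_def]
              split
              · simp_all
              · rename_i heq; injection heq with h1 _; exact absurd h1 hc
              · rename_i heq; injection heq with h1 h2; subst h1; subst h2; rfl
            rw [hsp]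
            cases hs : pvSplit rest with
            | nil => exact absurd hs (pvSplit_ne_nil rest)
            | cons p ps => simp [hs, List.modifyHead]

theorem pvSplitOn_quote (l : List Char) :
    PySem.Chars.splitOn l ['"'] = pvSplit l := by
  unfold PySem.Chars.splitOn
  rw [pvSplitOn_go_eq _ _ _ _ (by omega)]
  cases hs : pvSplit l with
  | nil => exact absurd hs (pvSplit_ne_nil l)
  | cons p ps => simp [List.modifyHead]

-- trailing-backslash count as a takeWhile on the reversed list
theorem pvTrailBS_eq (raw : List Char) :
    pvTrailBS raw = (raw.reverse.takeWhile (· = '\\')).length := by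
  unfold pvTrailBS
  have hsum := congrArg List.length
    (List.takeWhile_append_dropWhile (p := (· = '\\')) (l := raw.reverse))
  rw [List.length_append, List.length_reverse] at hsum
  simp only [List.length_reverse]
  omega

theorem pvTrail_cons_all (c : Char) (x : List Char) (h : ∀ a ∈ x, a = '\\') :
    pvTrailBS (c :: x) = (if c = '\\' then 1 else 0) + pvTrailBS x := by
  have hx : x.reverse.takeWhile (· = '\\') = x.reverse := by
    rw [List.takeWhile_eq_self_iff]
    intro a ha; simp [h a (List.mem_reverse.mp ha)]
  rw [pvTrailBS_eq, pvTrailBS_eq, List.reverse_cons, List.takeWhile_append]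
  rw [hx]
  simp only [List.length_reverse, if_pos rfl]
  by_cases hc : c = '\\' <;> simp [hc, List.takeWhile] <;> try omega

theorem pvTrail_cons_not_all (c : Char) (x : List Char) (h : ¬ ∀ a ∈ x, a = '\\') :
    pvTrailBS (c :: x) = pvTrailBS x := by
  have hx : x.reverse.takeWhile (· = '\\') ≠ x.reverse := by
    intro hEq
    exact h (fun a ha => by
      have := (List.takeWhile_eq_self_iff.mp hEq) a (List.mem_reverse.mpr ha)
      simpa using this)
  have hlen : (x.reverse.takeWhile (· = '\\')).length ≠ x.reverse.length := by
    intro hl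
    exact hx ((List.takeWhile_sublist _).eq_of_length hl)
  rw [pvTrailBS_eq, pvTrailBS_eq, List.reverse_cons, List.takeWhile_append]
  rw [if_neg (by simpa using hlen)]

theorem pvTrail_cons_ne (c : Char) (x : List Char) (hb : c ≠ '\\') :
    pvTrailBS (c :: x) = pvTrailBS x := by
  by_cases h : ∀ a ∈ x, a = '\\'
  · rw [pvTrail_cons_all c x h, if_neg hb]; omega
  · exact pvTrail_cons_not_all c x h

theorem pvTrail_parity (c : Char) (x : List Char) :
    pvTrailBS ('\\' :: c :: x) % 2 = pvTrailBS x % 2 := by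
  by_cases hx : ∀ a ∈ x, a = '\\'
  · by_cases hc : c = '\\'
    · subst hc
      have h1 : pvTrailBS ('\\' :: x) = 1 + pvTrailBS x := by
        rw [pvTrail_cons_all _ _ hx]; simp
      have h2 : pvTrailBS ('\\' :: '\\' :: x) = 1 + pvTrailBS ('\\' :: x) := by
        rw [pvTrail_cons_all _ _ (by intro a ha; rcases List.mem_cons.mp ha with h | h
                                     · exact h
                                     · exact hx a h)]
        simp
      omega
    · have h1 : pvTrailBS (c :: x) = pvTrailBS x := by
        rw [pvTrail_cons_all c x hx, if_neg hc]; simp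
      have h2 : pvTrailBS ('\\' :: c :: x) = pvTrailBS (c :: x) :=
        pvTrail_cons_not_all _ _ (by
          intro hall; exact hc (hall c (by simp)))
      omega
  · have h1 : pvTrailBS (c :: x) = pvTrailBS x := pvTrail_cons_not_all c x hx
    have h2 : pvTrailBS ('\\' :: c :: x) = pvTrailBS (c :: x) :=
      pvTrail_cons_not_all _ _ (by
        intro hall; exact hx (fun a ha => hall a (by simp [ha])))
    omega

theorem pvReglue_prepend (pre : List Char)
    (hp : ∀ x, pvTrailBS (pre ++ x) % 2 = pvTrailBS x % 2)
    (ps : List (List Char)) : ∀ r : List Char,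
    pvReglue (pre ++ r) ps = pre ++ pvReglue r ps := by
  induction ps with
  | nil => intro r; simp [pvReglue]
  | cons p ps ih =>
      intro r
      rw [pvReglue, pvReglue]
      by_cases h : pvTrailBS r % 2 = 0
      · rw [if_pos (by rw [hp r]; exact h), if_pos h]
      · rw [if_neg (by rw [hp r]; exact h), if_neg h, List.append_assoc]
        exact ih (r ++ '"' :: p)

-- the raw (still escaped) string B extracts, as a function of the tail
def pvRaw (l : List Char) : List Char :=
  match pvSplit l with
  | [] => []
  | p :: ps => pvReglue p ps

theorem pvRaw_quote (rest : List Char) : pvRaw ('"' :: rest) = [] := by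
  unfold pvRaw
  rw [show pvSplit ('"' :: rest) = [] :: pvSplit rest from rfl]
  cases pvSplit rest with
  | nil => simp [pvReglue]
  | cons p ps => simp [pvReglue, pvTrailBS]

theorem pvRaw_pair (c : Char) (rest : List Char) :
    pvRaw ('\\' :: c :: rest) = '\\' :: c :: pvRaw rest := by
  unfold pvRaw
  by_cases hc : c = '"'
  · subst hc
    rw [show pvSplit ('\\' :: '"' :: rest)
        = ([] :: pvSplit rest).modifyHead ('\\' :: ·) from rfl]
    cases hs : pvSplit rest with
    | nil => exact absurd hs (pvSplit_ne_nil rest)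
    | cons p ps =>
        simp only [List.modifyHead]
        rw [pvReglue]
        rw [if_neg (by simp [pvTrailBS])]
        have := pvReglue_prepend ['\\', '"'] (fun x => pvTrail_parity '"' x) ps p
        simpa using this
  · have hsp : pvSplit ('\\' :: c :: rest)
        = ((pvSplit rest).modifyHead (c :: ·)).modifyHead ('\\' :: ·) := by
      have h1 : pvSplit (c :: rest) = (pvSplit rest).modifyHead (c :: ·) := by
        rw [pvSplit.eq_def]
        split
        · simp_all
        · rename_i heq; injection heq with h1 _; exact absurd h1 hc
        · rename_i heq; injection heq with h1 h2; subst h1; subst h2; rfl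
      rw [show pvSplit ('\\' :: c :: rest)
          = (pvSplit (c :: rest)).modifyHead ('\\' :: ·) from rfl, h1]
    rw [hsp]
    cases hs : pvSplit rest with
    | nil => exact absurd hs (pvSplit_ne_nil rest)
    | cons p ps =>
        simp only [List.modifyHead]
        have := pvReglue_prepend ['\\', c] (fun x => pvTrail_parity c x) ps p
        simpa using this

theorem pvRaw_cons (c : Char) (rest : List Char) (hq : c ≠ '"') (hb : c ≠ '\\') :
    pvRaw (c :: rest) = c :: pvRaw rest := by
  unfold pvRaw
  have h1 : pvSplit (c :: rest) = (pvSplit rest).modifyHead (c :: ·) := by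
    rw [pvSplit.eq_def]
    split
    · simp_all
    · rename_i heq; injection heq with h1 _; exact absurd h1 hq
    · rename_i heq; injection heq with h1 h2; subst h1; subst h2; rfl
  rw [h1]
  cases hs : pvSplit rest with
  | nil => exact absurd hs (pvSplit_ne_nil rest)
  | cons p ps =>
      simp only [List.modifyHead]
      have := pvReglue_prepend [c]
        (fun x => by rw [show [c] ++ x = c :: x from rfl, pvTrail_cons_ne c x hb]) ps p
      simpa using this

theorem pvDecodeB_cons (c : Char) (r : List Char) (hb : c ≠ '\\') :
    pvDecodeB (c :: r) = c :: pvDecodeB r := by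
  cases r with
  | nil => rw [pvDecodeB.eq_def]; split <;> simp_all
  | cons d r' =>
      rw [pvDecodeB.eq_def]
      split
      · rename_i heq
        injection heq with h1 _
        exact absurd h1 hb
      · rename_i heq
        injection heq with h1 h2
        subst h1; subst h2; rfl
      · rename_i heq
        exact absurd heq (by simp)

theorem pvDecodeA_cons (c : Char) (r : List Char) (hb : c ≠ '\\') (hq : c ≠ '"') :
    pvDecodeA (c :: r) = c :: pvDecodeA r := by
  cases r with
  | nil => rw [pvDecodeA.eq_def]; split <;> simp_all
  | cons d r' => rw [pvDecodeA.eq_def]; split <;> simp_all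

theorem pvMain (l : List Char) : pvDecodeA l = pvDecodeB (pvRaw l) := by
  induction l using pvDecodeA.induct with
  | case1 => rfl
  | case2 next rest ih =>
      rw [pvRaw_pair, pvDecodeA]
      rw [show pvDecodeB ('\\' :: next :: pvRaw rest)
          = (if next = 'n' then '\n' else next) :: pvDecodeB (pvRaw rest) from rfl]
      rw [ih]
      congr 1
      by_cases h1 : next = 'n'
      · simp [h1]
      · by_cases h2 : next = '"' <;> by_cases h3 : next = '\\' <;> simp_all
  | case3 rest => rw [pvRaw_quote]; rfl
  | case4 c rest h1 h2 ih =>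
      by_cases hb : c = '\\'
      · subst hb
        cases rest with
        | nil => rfl
        | cons d r => exact (h1 d r rfl rfl).elim
      · have hq : c ≠ '"' := h2
        rw [pvDecodeA_cons c rest hb hq, pvRaw_cons c rest hq hb,
          pvDecodeB_cons c (pvRaw rest) hb, ih]

theorem pvCore (t : List Char) :
    pvDecodeB (match PySem.Chars.splitOn t ['"'] with
               | [] => []
               | p :: ps => pvReglue p ps) = pvDecodeA t := by
  rw [pvSplitOn_quote]
  exact (pvMain t).symm

-- ===== VERDICT (by name: the statement is the Claim_ definition above) =====
theorem extract_narrative_from_partial_spec : Claim_equal_extract_narrative_from_partial := by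
  intro s _
  show _ = _
  simp only [extract_narrative_from_partial, extract_narrative_from_partial_alt, pvCore]
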